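-- pv_equiv track=rewrite | github.com/luke-marshall/opencem-competition-model | two_sided_market_analyser.py | make_rational_bid_decision
-- ===== SOURCE A (Python) =====
-- def make_rational_bid_decision (possible_withholding_MW, demand_curve):
--     """
--     Given a maximum possible withholding volume and assuming that this is the marginal generator,
--     examine the demand curve and make the most valuable decision for this time period.
--     Returns a price, volume tuple.
--     """
--     # Work backwards from the end of the demand curve, assemble all possible rational candidate bids by taking maximum volume shadow bid at each price point.
--     candidate_bids = []
--     remaining_volume = 0
--     for demand_bid in reversed(demand_curve):
--         shadow_price = demand_bid[0] - 1
--         # Volume available at a given demand level.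
--         volume = max(min(demand_bid[1], possible_withholding_MW - remaining_volume), 0)
--         candidate_bids.append( (shadow_price, volume))
--         remaining_volume += volume
--
--     # Loop through all the candidate bids, see which one earns the most.
--
--     candidate = candidate_bids[0]
--     for bid in candidate_bids:
--         # Bid earns volume dispatched * price.
--         if bid[0] * bid[1] > candidate[0] * candidate[1]:
--             candidate = bid
--         # If bid has same return but lower volume dispatched, favour lower volume
--         elif bid[0] * bid[1] == candidate[0] * candidate[1] and bid[1] < candidate[1]:
--             candidate = bid
--
--     # Return the bid with the highest return
--     return candidate
-- ===== SOURCE B (Python) =====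
-- def make_rational_bid_decision(possible_withholding_MW, demand_curve):
--     """
--     Closed-form reformulation: instead of simulating the clamped running
--     remaining_volume, note that after processing k bids (from the back) the
--     withheld volume equals min(S_k, cap) where S_k is the plain prefix sum of
--     the non-negative demand volumes and cap = max(possible_withholding_MW, 0).
--     Hence the dispatchable volume at step k is min(S_{k+1}, cap) - min(S_k, cap).
--     Build the unclamped prefix sums, derive every candidate by that formula,
--     and select the winner with min() under the key (-profit, volume), which is
--     exactly 'highest profit, then lowest volume, first occurrence wins'.
--     """
--     cap = max(possible_withholding_MW, 0)
--     rev = demand_curve[::-1]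
--     prefix = [0]
--     for _, vol in rev:
--         prefix.append(prefix[-1] + max(vol, 0))
--     cands = [(price - 1, min(hi, cap) - min(lo, cap))
--              for (price, _), lo, hi in zip(rev, prefix, prefix[1:])]
--     return min(cands, key=lambda bid: (-bid[0] * bid[1], bid[1]))
-- ===== Notes on version B (the rewrite author's own statement) =====
-- stated objective: alternative
-- what changed: Replaces A's sequential simulation of the clamped remaining_volume state by a closed-form prefix-sum formula (volume_k = min(S_{k+1},cap) - min(S_k,cap) with unclamped prefix sums S and cap = max(withholding,0)), and replaces A's hand-rolled best-candidate scan by stdlib min() with the key (-profit, volume).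
-- outside the precondition, e.g. on make_rational_bid_decision(10, []): A raises IndexError, B raises ValueError
import Mathlib
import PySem

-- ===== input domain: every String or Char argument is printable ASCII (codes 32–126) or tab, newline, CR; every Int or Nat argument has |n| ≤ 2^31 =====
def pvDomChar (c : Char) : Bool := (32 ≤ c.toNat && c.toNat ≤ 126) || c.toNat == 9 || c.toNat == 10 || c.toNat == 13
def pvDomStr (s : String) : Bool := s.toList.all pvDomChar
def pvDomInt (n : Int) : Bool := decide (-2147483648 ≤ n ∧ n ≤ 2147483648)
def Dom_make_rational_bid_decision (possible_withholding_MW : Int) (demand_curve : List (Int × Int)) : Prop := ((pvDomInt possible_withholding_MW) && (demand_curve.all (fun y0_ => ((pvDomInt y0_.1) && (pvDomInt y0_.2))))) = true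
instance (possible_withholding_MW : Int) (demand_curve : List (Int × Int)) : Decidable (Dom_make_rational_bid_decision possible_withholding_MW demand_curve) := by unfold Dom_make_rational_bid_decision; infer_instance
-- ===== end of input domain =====

-- B replaces A's sequential clamped remaining-volume simulation by a closed-form
-- prefix-sum formula for each candidate's volume and a stdlib min() with key for
-- the selection (objective: alternative).


-- ===== PORT A =====
-- Pass 1 of A: build candidate_bids (appending) while accumulating remaining_volume.
def pvA_step (pw : Int) (st : List (Int × Int) × Int) (db : Int × Int) : List (Int × Int) × Int :=
  let shadow_price := db.1 - 1
  let volume := max (min db.2 (pw - st.2)) 0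
  (st.1 ++ [(shadow_price, volume)], st.2 + volume)

-- Pass 2 of A: the candidate-selection step of the second loop.
def pvA_pick (c bid : Int × Int) : Int × Int :=
  if bid.1 * bid.2 > c.1 * c.2 then bid
  else if bid.1 * bid.2 = c.1 * c.2 ∧ bid.2 < c.2 then bid
  else c

def make_rational_bid_decision (possible_withholding_MW : Int) (demand_curve : List (Int × Int)) : Int × Int :=
  let candidate_bids := (demand_curve.reverse.foldl (pvA_step possible_withholding_MW) ([], 0)).1
  match candidate_bids with
  | [] => (0, 0)  -- Python raises IndexError here (candidate_bids[0]); excluded by Pre_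
  | c0 :: _ => candidate_bids.foldl pvA_pick c0

-- ===== PORT B =====
-- Source B's prefix-sum loop ('prefix = [0]; prefix.append(prefix[-1] + max(vol,0))'),
-- transcribed as a recursion carrying the running last element.
def pvPrefix (last : Int) : List (Int × Int) → List Int
  | [] => [last]
  | db :: rest => last :: pvPrefix (last + max db.2 0) rest

-- Source B's selection key: lambda bid: (-bid[0]*bid[1], bid[1]).
def pvKey (bid : Int × Int) : Int × Int := (-(bid.1 * bid.2), bid.2)

-- Python tuple '<' on int pairs (lexicographic).
def pvTupLt (a b : Int × Int) : Bool := a.1 < b.1 || (a.1 == b.1 && a.2 < b.2)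

-- Python's min(iterable, key=pvKey): first element with strictly minimal key.
def pvMinBy (best : Int × Int) : List (Int × Int) → Int × Int
  | [] => best
  | b :: r => pvMinBy (if pvTupLt (pvKey b) (pvKey best) then b else best) r

def make_rational_bid_decision_alt (possible_withholding_MW : Int) (demand_curve : List (Int × Int)) : Int × Int :=
  let cap := max possible_withholding_MW 0
  let rev := demand_curve.reverse
  let pre := pvPrefix 0 rev
  let cands := List.zipWith3 (fun (db : Int × Int) lo hi => (db.1 - 1, min hi cap - min lo cap)) rev pre (pre.drop 1)
  match cands with
  | [] => (0, 0)  -- Python's min raises ValueError on an empty curve; excluded by Pre_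
  | c :: rest => pvMinBy c rest

-- ===== PRECONDITION & SPEC =====
-- Pre_ excludes only the empty demand curve, on which A raises IndexError (B raises ValueError).
def Pre_make_rational_bid_decision (possible_withholding_MW : Int) (demand_curve : List (Int × Int)) : Prop :=
  demand_curve ≠ []
instance (possible_withholding_MW : Int) (demand_curve : List (Int × Int)) : Decidable (Pre_make_rational_bid_decision possible_withholding_MW demand_curve) := by unfold Pre_make_rational_bid_decision; infer_instance

def pvWitness_make_rational_bid_decision : Int × (List (Int × Int)) := (10, [(5, 3), (4, 8), (2, 6)])

def Spec_make_rational_bid_decision (possible_withholding_MW : Int) (demand_curve : List (Int × Int)) (out : Int × Int) : Prop := out = make_rational_bid_decision_alt possible_withholding_MW demand_curve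
instance (possible_withholding_MW : Int) (demand_curve : List (Int × Int)) (out : Int × Int) : Decidable (Spec_make_rational_bid_decision possible_withholding_MW demand_curve out) := by unfold Spec_make_rational_bid_decision; infer_instance

-- ===== CLAIM =====
def Claim_equal_make_rational_bid_decision : Prop := ∀ (possible_withholding_MW : Int) (demand_curve : List (Int × Int)), Dom_make_rational_bid_decision possible_withholding_MW demand_curve → Pre_make_rational_bid_decision possible_withholding_MW demand_curve → Spec_make_rational_bid_decision possible_withholding_MW demand_curve (make_rational_bid_decision possible_withholding_MW demand_curve)

-- ===== LEMMAS AND PROOFS =====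

-- The candidate bids A generates starting from remaining volume rv, without the append accumulator.
def pvCands (pw rv : Int) : List (Int × Int) → List (Int × Int)
  | [] => []
  | db :: rest =>
    let v := max (min db.2 (pw - rv)) 0
    (db.1 - 1, v) :: pvCands pw (rv + v) rest

lemma pvA_build (pw : Int) (l : List (Int × Int)) (acc : List (Int × Int)) (rv : Int) :
    (l.foldl (pvA_step pw) (acc, rv)).1 = acc ++ pvCands pw rv l := by
  induction l generalizing acc rv with
  | nil => simp [pvCands]
  | cons db rest ih =>
    simp only [List.foldl_cons, pvA_step, pvCands]
    rw [ih]
    simp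

-- B's zipWith3 over the unclamped prefix sums equals A's clamped candidate list.
lemma pvB_cands (pw : Int) (l : List (Int × Int)) (s : Int) (hs : 0 ≤ s) :
    List.zipWith3 (fun (db : Int × Int) lo hi => (db.1 - 1, min hi (max pw 0) - min lo (max pw 0)))
      l (pvPrefix s l) ((pvPrefix s l).drop 1)
    = pvCands pw (min s (max pw 0)) l := by
  induction l generalizing s with
  | nil => simp [pvCands, List.zipWith3]
  | cons db rest ih =>
    have hhead : ∀ (t : Int) (m : List (Int × Int)), pvPrefix t m = t :: (pvPrefix t m).drop 1 := by
      intro t m; cases m <;> simp [pvPrefix]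
    simp only [pvPrefix, pvCands, List.drop_succ_cons, List.drop_zero]
    rw [hhead (s + max db.2 0) rest]
    simp only [List.zipWith3]
    rw [← hhead (s + max db.2 0) rest, ih (s + max db.2 0) (by omega)]
    have h1 : min (s + max db.2 0) (max pw 0) - min s (max pw 0)
        = max (min db.2 (pw - min s (max pw 0))) 0 := by omega
    have h2 : min s (max pw 0) + max (min db.2 (pw - min s (max pw 0))) 0
        = min (s + max db.2 0) (max pw 0) := by omega
    rw [h1, h2]

-- A's selection step is exactly 'keep the smaller key', key = (-profit, volume) lexicographic.
lemma pick_eq_key (c b : Int × Int) :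
    pvA_pick c b = if pvTupLt (pvKey b) (pvKey c) then b else c := by
  have hc : (pvTupLt (pvKey b) (pvKey c) = true) ↔
      (c.1 * c.2 < b.1 * b.2 ∨ (b.1 * b.2 = c.1 * c.2 ∧ b.2 < c.2)) := by
    simp only [pvTupLt, pvKey, Bool.or_eq_true, Bool.and_eq_true, decide_eq_true_eq, beq_iff_eq]
    omega
  by_cases h : pvTupLt (pvKey b) (pvKey c) = true
  · rw [if_pos h]
    have hd := hc.mp h
    unfold pvA_pick
    split_ifs with h1 h2 <;> first | rfl | (exfalso; omega)
  · rw [if_neg h]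
    have hd : ¬ (c.1 * c.2 < b.1 * b.2 ∨ (b.1 * b.2 = c.1 * c.2 ∧ b.2 < c.2)) :=
      fun hx => h (hc.mpr hx)
    unfold pvA_pick
    split_ifs with h1 h2 <;> first | rfl | (exfalso; omega)

lemma fold_eq_minBy (l : List (Int × Int)) (c : Int × Int) :
    l.foldl pvA_pick c = pvMinBy c l := by
  induction l generalizing c with
  | nil => rfl
  | cons b r ih => simp only [List.foldl_cons, pvMinBy, pick_eq_key, ih]

lemma pvA_pick_self (c : Int × Int) : pvA_pick c c = c := by
  simp [pvA_pick]

-- ===== VERDICT =====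
theorem make_rational_bid_decision_spec : Claim_equal_make_rational_bid_decision := by
  intro pw dc _ hpre
  unfold Spec_make_rational_bid_decision make_rational_bid_decision make_rational_bid_decision_alt
  have hrev : dc.reverse ≠ [] := by simpa using hpre
  obtain ⟨db, rest, hr⟩ := List.exists_cons_of_ne_nil hrev
  rw [hr]
  simp only [pvA_build pw (db :: rest) [] 0, List.nil_append]
  rw [pvB_cands pw (db :: rest) 0 (le_refl 0)]
  have h0 : min (0 : Int) (max pw 0) = 0 := by omega
  rw [h0]
  simp only [pvCands]
  rw [List.foldl_cons, pvA_pick_self, fold_eq_minBy]
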